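-- pv_equiv track=rewrite | github.com/RawIron/hackerrank | python-skills/piling_up.py | solve
-- ===== SOURCE A (Python) =====
-- def solve(lengths):
--     """
--     a bar has several bumper plates of different weights/diameter
--         -4-6-8-3-1-
--     in the above example the plate "4" or the plate "1" can be removed from the bar
--     can smaller bumper plates always be stacked on larger bumper plates
--     until there are no plates left on the bar?
--
--     on every move take the larger of the two accessable bumper plates from the bar
--     and put it on top of the previous plate
--     """
--     if not isinstance(lengths, list):
--         lengths = list(lengths)
--
--     plate_on_top = 2**31    # weight of the plate on top of the stack
--     l = 0                   # accessable plate on the left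
--     r = len(lengths)-1      # accessable plate on the right
--
--     while l <= r:
--         take_left_plate = (lengths[l] >= lengths[r])
--         if take_left_plate:
--             picked = lengths[l]
--             l += 1
--         else:
--             picked = lengths[r]
--             r -= 1
--
--         if picked > plate_on_top:
--             break
--
--         plate_on_top = picked
--
--     bar_has_plates = (l <= r)
--     if bar_has_plates:
--         return False
--     else:
--         return True
-- ===== SOURCE B (Python) =====
-- def solve(lengths):
--     """True iff the plates can be piled: the list must be 'valley-shaped'
--     (never descend again after an ascent), checked in one linear pass."""
--     if not isinstance(lengths, list):
--         lengths = list(lengths)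
--     rising = False
--     for a, b in zip(lengths, lengths[1:]):
--         if b > a:
--             rising = True
--         elif b < a and rising:
--             return False
--     return True
-- ===== Notes on version B (the rewrite author's own statement) =====
-- stated objective: simpler
-- what changed: Replaces the two-pointer greedy pile simulation with a single linear pass over adjacent pairs that rejects exactly when a descent follows an ascent (valley-shape test).
import Mathlib
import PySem

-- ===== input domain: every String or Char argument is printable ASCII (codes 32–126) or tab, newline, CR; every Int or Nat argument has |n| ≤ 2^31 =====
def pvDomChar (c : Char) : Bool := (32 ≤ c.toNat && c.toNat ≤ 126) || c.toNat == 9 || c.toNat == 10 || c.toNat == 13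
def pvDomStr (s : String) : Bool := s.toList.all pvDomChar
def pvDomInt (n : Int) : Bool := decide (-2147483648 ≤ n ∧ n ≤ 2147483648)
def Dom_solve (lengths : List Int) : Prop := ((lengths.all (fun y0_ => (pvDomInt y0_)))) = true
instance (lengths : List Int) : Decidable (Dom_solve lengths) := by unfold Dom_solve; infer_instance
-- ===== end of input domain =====

-- B replaces A's two-pointer greedy pile simulation by a single pass over adjacent
-- pairs that fails exactly when a descent follows an ascent (valley-shape test).

-- ===== PORT A =====
-- the while loop of A, state (plate_on_top, l, r); returns the final (l, r);
-- both indices are in range whenever read, so .getD 0 is never taken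

def loopA (xs : List Int) (top l r : Int) : Int × Int :=
  if _h : l ≤ r then
    let a := (PySem.List.pyGet? xs l).getD 0
    let b := (PySem.List.pyGet? xs r).getD 0
    if a ≥ b then
      if a > top then (l + 1, r) else loopA xs a (l + 1) r
    else
      if b > top then (l, r - 1) else loopA xs b l (r - 1)
  else (l, r)
termination_by (r + 1 - l).toNat
decreasing_by all_goals (simp_wf; omega)

def solve (lengths : List Int) : Bool :=
  let p := loopA lengths (2 ^ 31) 0 ((lengths.length : Int) - 1)
  !(decide (p.1 ≤ p.2))

-- ===== PORT B =====
-- the for-loop of B over adjacent pairs, state 'rising'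
def goB (rising : Bool) : List Int → Bool
  | a :: b :: rest =>
    if b > a then goB true (b :: rest)
    else if b < a ∧ rising then false
    else goB rising (b :: rest)
  | _ => true

def solve_alt (lengths : List Int) : Bool := goB false lengths

-- ===== PRECONDITION & SPEC =====
def Spec_solve (lengths : List Int) (out : Bool) : Prop := out = solve_alt lengths
instance (lengths : List Int) (out : Bool) : Decidable (Spec_solve lengths out) := by unfold Spec_solve; infer_instance

-- ===== CLAIM (what is proved, stated in full; the proofs are below) =====
def Claim_equal_solve : Prop := ∀ (lengths : List Int), Dom_solve lengths → Spec_solve lengths (solve lengths)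

-- ===== LEMMAS AND PROOFS =====

def lastI (l : List Int) : Int := l.getLast?.getD 0

lemma lastI_cons_cons (a b : Int) (t : List Int) : lastI (a :: b :: t) = lastI (b :: t) := by
  simp [lastI, List.getLast?_cons_cons]

lemma lastI_singleton (a : Int) : lastI [a] = a := rfl

lemma lastI_mem (a : Int) (l : List Int) : lastI (a :: l) ∈ a :: l := by
  simp [lastI, List.getLast?_eq_some_getLast]

-- goB true = true means non-decreasing: every element ≤ the last
lemma goB_true_le_last (a : Int) (l : List Int) (h : goB true (a :: l) = true) :
    ∀ y ∈ a :: l, y ≤ lastI (a :: l) := by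
  induction l generalizing a with
  | nil => simp [lastI_singleton]
  | cons c t ih =>
    simp only [goB] at h
    have hac : a ≤ c := by
      by_contra hlt
      simp [not_le.mp hlt, not_lt_of_gt (not_le.mp hlt)] at h
    have h' : goB true (c :: t) = true := by
      rcases lt_or_eq_of_le hac with h1 | h1
      · simpa [h1] using h
      · subst h1; simpa using h
    intro y hy
    rw [lastI_cons_cons]
    rcases List.mem_cons.mp hy with rfl | hy
    · exact le_trans hac (ih c h' c (by simp))
    · exact ih c h' y hy

lemma goB_true_imp (l : List Int) (h : goB true l = true) : goB false l = true := by
  induction l with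
  | nil => rfl
  | cons a t ih =>
    cases t with
    | nil => rfl
    | cons c r =>
      simp only [goB] at h ⊢
      by_cases h1 : c > a
      · rw [if_pos h1] at h ⊢; exact h
      · rw [if_neg h1] at h ⊢
        by_cases h3 : c < a
        · simp [h3] at h
        · simp only [h3, false_and, if_false] at h ⊢
          exact ih h

-- dropping the head preserves goB false
lemma goB_false_tail (a : Int) (l : List Int) (h : goB false (a :: l) = true) :
    goB false l = true := by
  cases l with
  | nil => rfl
  | cons c r =>
    simp only [goB] at h
    split_ifs at h with h1
    · exact goB_true_imp _ h
    · exact h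

-- a head dominating the tail changes nothing
lemma goB_false_cons_of_le (a : Int) (l : List Int) (hle : ∀ y ∈ l, y ≤ a) :
    goB false (a :: l) = goB false l := by
  cases l with
  | nil => rfl
  | cons c r =>
    have h1 : ¬ c > a := not_lt.mpr (hle c (by simp))
    simp [goB, h1]

-- every tail element of a valley is ≤ max(head, last)
lemma goB_false_bounded (a : Int) (l : List Int) (h : goB false (a :: l) = true) :
    ∀ y ∈ l, y ≤ max a (lastI (a :: l)) := by
  induction l generalizing a with
  | nil => simp
  | cons c t ih =>
    simp only [goB] at h
    rw [lastI_cons_cons]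
    intro y hy
    by_cases h1 : c > a
    · rw [if_pos h1] at h
      exact le_trans (goB_true_le_last c t h y hy) (le_max_of_le_right le_rfl)
    · simp only [h1, if_false] at h
      have h' : goB false (c :: t) = true := by simpa using h
      rcases List.mem_cons.mp hy with rfl | hy
      · exact le_max_of_le_left (not_lt.mp h1)
      · have := ih c h' y hy
        rcases max_cases c (lastI (c :: t)) with ⟨he, _⟩ | ⟨he, _⟩
        · rw [he] at this
          exact le_max_of_le_left (le_trans this (not_lt.mp h1))
        · rw [he] at this
          exact le_max_of_le_right this

-- dropping the last element preserves goB
lemma goB_dropLast (ri : Bool) (l : List Int) (b : Int) (h : goB ri (l ++ [b]) = true) :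
    goB ri l = true := by
  induction l generalizing ri with
  | nil => rfl
  | cons a t ih =>
    cases t with
    | nil => rfl
    | cons c r =>
      simp only [List.cons_append, goB] at h ⊢
      split_ifs at h ⊢ with h1 h2
      all_goals first | exact h | exact ih _ h

-- appending an element dominating the list preserves goB
lemma goB_append_max (ri : Bool) (l : List Int) (b : Int) (h : goB ri l = true)
    (hle : ∀ y ∈ l, y ≤ b) : goB ri (l ++ [b]) = true := by
  induction l generalizing ri with
  | nil => rfl
  | cons a t ih =>
    cases t with
    | nil =>
      have hab : a ≤ b := hle a (by simp)
      simp only [List.cons_append, List.nil_append, goB]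
      rcases lt_or_eq_of_le hab with h1 | h1
      · simp [h1]
      · subst h1; simp
    | cons c r =>
      simp only [List.cons_append, goB] at h ⊢
      split_ifs at h ⊢ with h1 h2
      all_goals first
        | exact h
        | exact ih _ h (fun y hy => hle y (by simp at hy ⊢; tauto))


def greedy : List Int → Int → Bool
  | [], _ => true
  | y :: ys, top =>
    let b := lastI (y :: ys)
    if y ≥ b then
      if y > top then false else greedy ys y
    else
      if b > top then false else greedy ((y :: ys).dropLast) b
termination_by l _ => l.length
decreasing_by all_goals simp

lemma greedy_eq (n : ℕ) : ∀ (l : List Int), l.length ≤ n → ∀ (top : Int),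
    greedy l top = (l.all (fun y => decide (y ≤ top)) && goB false l) := by
  induction n with
  | zero =>
    intro l hl top
    rw [List.length_eq_zero_iff.mp (Nat.le_zero.mp hl)]
    simp [greedy, goB]
  | succ n ih =>
    intro l hl top
    cases l with
    | nil => simp [greedy, goB]
    | cons y ys =>
      set b := lastI (y :: ys) with hb
      have hbmem : b ∈ y :: ys := lastI_mem y ys
      rw [Bool.eq_iff_iff]
      simp only [Bool.and_eq_true, List.all_eq_true, decide_eq_true_eq]
      by_cases h1 : y ≥ b
      · by_cases h2 : y > top
        · rw [show greedy (y :: ys) top = false by rw [greedy]; simp only [← hb, if_pos h1, if_pos h2]]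
          constructor
          · intro h; cases h
          · rintro ⟨hall, -⟩
            exact absurd (hall y (by simp)) (not_le.mpr h2)
        · rw [show greedy (y :: ys) top = greedy ys y by rw [greedy]; simp only [← hb, if_pos h1, if_neg h2]]
          rw [ih ys (by simp at hl; omega) y, Bool.and_eq_true]
          simp only [List.all_eq_true, decide_eq_true_eq]
          constructor
          · rintro ⟨hall, hgo⟩
            refine ⟨?_, ?_⟩
            · intro z hz
              rcases List.mem_cons.mp hz with rfl | hz
              · exact not_lt.mp h2
              · exact le_trans (hall z hz) (not_lt.mp h2)
            · rw [goB_false_cons_of_le y ys hall]; exact hgo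
          · rintro ⟨hall, hgo⟩
            have hys : ∀ z ∈ ys, z ≤ y := by
              intro z hz
              have := goB_false_bounded y ys hgo z hz
              rwa [← hb, max_eq_left h1] at this
            exact ⟨hys, goB_false_tail y ys hgo⟩
      · have hlt : y < b := not_le.mp h1
        by_cases h2 : b > top
        · rw [show greedy (y :: ys) top = false by
            rw [greedy]; simp only [← hb, if_neg h1, if_pos h2]]
          constructor
          · intro h; cases h
          · rintro ⟨hall, -⟩
            exact absurd (hall b hbmem) (not_le.mpr h2)
        · rw [show greedy (y :: ys) top = greedy ((y :: ys).dropLast) b by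
            rw [greedy]; simp only [← hb, if_neg h1, if_neg h2]]
          rw [ih ((y :: ys).dropLast) (by simp at hl ⊢; omega) b, Bool.and_eq_true]
          simp only [List.all_eq_true, decide_eq_true_eq]
          have hsplit : (y :: ys).dropLast ++ [b] = y :: ys := by
            rw [hb, lastI, List.getLast?_eq_some_getLast (l := y :: ys) (by simp)]
            simp [List.dropLast_concat_getLast]
          constructor
          · rintro ⟨hall, hgo⟩
            have hallfull : ∀ z ∈ y :: ys, z ≤ top := by
              intro z hz
              rcases (by rw [← hsplit] at hz; simpa using hz : z ∈ (y :: ys).dropLast ∨ z = b) with hz' | rfl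
              · exact le_trans (hall z hz') (not_lt.mp h2)
              · exact not_lt.mp h2
            refine ⟨hallfull, ?_⟩
            rw [← hsplit]
            exact goB_append_max false _ b hgo hall
          · rintro ⟨hall, hgo⟩
            have hbound : ∀ z ∈ ys, z ≤ b := by
              intro z hz
              have := goB_false_bounded y ys hgo z hz
              rwa [← hb, max_eq_right (le_of_lt hlt)] at this
            have hdl : ∀ z ∈ (y :: ys).dropLast, z ≤ b := by
              intro z hz
              have hz' : z ∈ y :: ys := List.mem_of_mem_dropLast hz
              rcases List.mem_cons.mp hz' with rfl | hz'
              · exact le_of_lt hlt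
              · exact hbound z hz'
            refine ⟨hdl, ?_⟩
            exact goB_dropLast false _ b (by rw [hsplit]; exact hgo)


def seg (xs : List Int) (l r : ℕ) : List Int := (xs.drop l).take (r + 1 - l)

lemma seg_len (xs : List Int) (l r : ℕ) (hr : r < xs.length) :
    (seg xs l r).length = r + 1 - l := by
  unfold seg
  rw [List.length_take, List.length_drop]
  omega

lemma seg_cons (xs : List Int) (l r : ℕ) (hl : l ≤ r) (hr : r < xs.length) :
    seg xs l r = xs[l]'(by omega) :: seg xs (l + 1) r := by
  unfold seg
  rw [List.drop_eq_getElem_cons (by omega)]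
  rw [show r + 1 - l = (r - l) + 1 by omega, List.take_succ_cons]
  congr 2
  omega

lemma seg_last (xs : List Int) (l r : ℕ) (hl : l ≤ r) (hr : r < xs.length) :
    lastI (seg xs l r) = xs[r]'hr := by
  have hne : seg xs l r ≠ [] := by
    intro h
    have := seg_len xs l r hr
    rw [h] at this
    simp at this; omega
  rw [lastI, List.getLast?_eq_some_getLast (l := seg xs l r) hne]
  simp only [Option.getD_some]
  rw [List.getLast_eq_getElem]
  have hlen := seg_len xs l r hr
  have hidx : (seg xs l r).length - 1 = r - l := by omega
  simp only [hidx]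
  unfold seg
  rw [List.getElem_take, List.getElem_drop]
  congr 1
  omega

lemma seg_dropLast (xs : List Int) (l r : ℕ) (hl : l < r) (hr : r < xs.length) :
    (seg xs l r).dropLast = seg xs l (r - 1) := by
  unfold seg
  rw [List.dropLast_eq_take, List.take_take, List.length_take, List.length_drop]
  have h1 : min (r + 1 - l) (xs.length - l) = r + 1 - l := by omega
  rw [h1]
  congr 1
  omega

lemma loopA_spec : ∀ (k : ℕ) (xs : List Int) (top : Int) (l r : ℕ), r < xs.length → r + 1 - l ≤ k →
    (l = r → xs.getD r 0 ≤ top) →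
    decide ((loopA xs top l r).1 ≤ (loopA xs top l r).2) = !greedy (seg xs l r) top := by
  intro k
  induction k with
  | zero =>
    intro xs top l r hr hk hlr
    have hgt : ¬ ((l : Int) ≤ (r : Int)) := by push_cast; omega
    rw [loopA, dif_neg hgt]
    have : seg xs l r = [] := by
      unfold seg
      rw [List.take_eq_nil_iff]   -- maybe wrong name; fix below
      omega
    rw [this]
    simp [greedy]
    omega
  | succ k ih =>
    intro xs top l r hr hk hlr
    by_cases hcross : l ≤ r
    case neg =>
      have hgt : ¬ ((l : Int) ≤ (r : Int)) := by push_cast; omega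
      rw [loopA, dif_neg hgt]
      have : seg xs l r = [] := by
        unfold seg
        rw [List.take_eq_nil_iff]
        omega
      rw [this]
      simp [greedy]
      omega
    case pos =>
      have hln : l < xs.length := by omega
      have hle : ((l : Int) ≤ (r : Int)) := by push_cast; omega
      have ha : (PySem.List.pyGet? xs (l : Int)).getD 0 = xs[l]'hln := by simp [pysem, hln]
      have hbv : (PySem.List.pyGet? xs (r : Int)).getD 0 = xs[r]'hr := by simp [pysem, hr]
      rw [loopA, dif_pos hle]
      simp only [ha, hbv]
      have hseg := seg_cons xs l r hcross hr
      have hlast := seg_last xs l r hcross hr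
      by_cases hab : xs[l]'hln ≥ xs[r]'hr
      · rw [if_pos hab]
        by_cases htop : xs[l]'hln > top
        · rw [if_pos htop]
          have hne : l ≠ r := by
            intro h
            subst h
            exact absurd (hlr rfl) (by rw [List.getD_eq_getElem _ _ hr] at *; omega)
          have hlt : l < r := by omega
          have hg : greedy (seg xs l r) top = false := by
            rw [hseg, greedy]
            rw [← hseg, hlast]
            simp only [if_pos hab, if_pos htop]
          rw [hg]
          simp
          push_cast
          omega
        · rw [if_neg htop]
          have hcast : ((l : Int) + 1) = ((l + 1 : ℕ) : Int) := by push_cast; ring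
          rw [hcast]
          rw [ih xs (xs[l]'hln) (l+1) r hr (by omega)
            (by intro h; rw [List.getD_eq_getElem _ _ hr]; omega)]
          have hg : greedy (seg xs l r) top = greedy (seg xs (l+1) r) (xs[l]'hln) := by
            rw [hseg, greedy]
            rw [← hseg, hlast]
            simp only [if_pos hab, if_neg htop]
          rw [hg]
      · rw [if_neg hab]
        have hlt : l < r := by
          rcases Nat.lt_or_ge l r with h | h
          · exact h
          · exfalso; have : l = r := by omega
            subst this; exact hab (le_refl _)
        by_cases htop : xs[r]'hr > top
        · rw [if_pos htop]
          have hg : greedy (seg xs l r) top = false := by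
            rw [hseg, greedy]
            rw [← hseg, hlast]
            simp only [if_neg (by omega : ¬ xs[l]'hln ≥ xs[r]'hr), if_pos htop]
          rw [hg]
          simp
          push_cast
          omega
        · rw [if_neg htop]
          have hcast : ((r : Int) - 1) = ((r - 1 : ℕ) : Int) := by push_cast; omega
          rw [hcast]
          rw [ih xs (xs[r]'hr) l (r-1) (by omega) (by omega)
            (by intro h
                rw [List.getD_eq_getElem _ _ (by omega : r - 1 < xs.length)]
                simp only [← h]
                omega)]
          have hg : greedy (seg xs l r) top = greedy (seg xs l (r-1)) (xs[r]'hr) := by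
            rw [hseg, greedy]
            rw [← hseg, hlast]
            simp only [if_neg (by omega : ¬ xs[l]'hln ≥ xs[r]'hr), if_neg htop]
            rw [seg_dropLast xs l r hlt hr]
          rw [hg]

lemma solve_eq_alt (xs : List Int) (hdom : Dom_solve xs) : solve xs = solve_alt xs := by
  have hbound : ∀ z ∈ xs, z ≤ (2 ^ 31 : Int) := by
    intro z hz
    unfold Dom_solve at hdom
    simp only [List.all_eq_true, pvDomInt, decide_eq_true_eq] at hdom
    have := (hdom z hz).2
    norm_num
    omega
  cases xs with
  | nil => simp [solve, solve_alt, loopA, goB]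
  | cons y ys =>
    unfold solve
    have hcast : (((y :: ys).length : Int) - 1) = (((y :: ys).length - 1 : ℕ) : Int) := by
      push_cast
      simp
    rw [hcast, show (0 : Int) = ((0 : ℕ) : Int) by norm_num]
    simp only
    rw [loopA_spec ((y :: ys).length) (y :: ys) (2 ^ 31) 0 ((y :: ys).length - 1)
      (by simp) (by omega)
      (by intro h
          rw [List.getD_eq_getElem _ _ (by simp : (y :: ys).length - 1 < (y :: ys).length)]
          exact hbound _ (List.getElem_mem _))]
    rw [show seg (y :: ys) 0 ((y :: ys).length - 1) = y :: ys by
      unfold seg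
      rw [List.drop_zero, show (y :: ys).length - 1 + 1 - 0 = (y :: ys).length by simp,
        List.take_length]]
    rw [Bool.not_not]
    rw [greedy_eq ((y :: ys).length) (y :: ys) le_rfl (2 ^ 31)]
    rw [show (y :: ys).all (fun z => decide (z ≤ (2 ^ 31 : Int))) = true by
      simp only [List.all_eq_true, decide_eq_true_eq]
      exact fun z hz => hbound z hz]
    rw [Bool.true_and]
    rfl

-- ===== VERDICT (by name: the statement is the Claim_ definition above) =====
theorem solve_spec : Claim_equal_solve := by
  intro lengths hdom
  unfold Spec_solve
  exact solve_eq_alt lengths hdom
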